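-- pv_equiv track=rewrite | github.com/bsyu1125/AdventOfCode | 2015/Day13/Day13.py | makeArrangements
-- ===== SOURCE A (Python) =====
-- import itertools
--
-- def makeArrangements(input):
--     result = []
--
--     permutations = list(itertools.permutations(input[1:]))
--     for permutation in permutations:
--         permutationList = list(permutation)
--         permutationList.append(input[0])
--         result.append(permutationList)
--
--     return result
-- ===== SOURCE B (Python) =====
-- def makeArrangements(input):
--     first = input[0]
--     result = []
--
--     def go(remaining, prefix):
--         if not remaining:
--             result.append(prefix + [first])
--             return
--         for i in range(len(remaining)):
--             go(remaining[:i] + remaining[i+1:], prefix + [remaining[i]])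
--
--     go(input[1:], [])
--     return result
-- ===== Notes on version B (the rewrite author's own statement) =====
-- stated objective: alternative
-- what changed: Replaces itertools.permutations plus a post-processing loop with a hand-rolled recursive generator that picks elements by index and appends input[0] directly as each permutation is completed.
import Mathlib
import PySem

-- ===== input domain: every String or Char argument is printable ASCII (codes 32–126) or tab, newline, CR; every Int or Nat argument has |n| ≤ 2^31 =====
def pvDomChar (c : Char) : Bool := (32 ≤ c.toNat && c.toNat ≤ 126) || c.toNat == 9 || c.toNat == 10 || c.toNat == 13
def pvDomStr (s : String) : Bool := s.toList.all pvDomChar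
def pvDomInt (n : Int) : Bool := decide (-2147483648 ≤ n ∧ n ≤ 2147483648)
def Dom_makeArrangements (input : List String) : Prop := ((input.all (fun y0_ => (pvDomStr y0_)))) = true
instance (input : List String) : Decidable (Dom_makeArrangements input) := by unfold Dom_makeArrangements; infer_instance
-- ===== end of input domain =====

-- B replaces itertools.permutations + a post-processing loop by a hand-rolled recursive
-- permutation generator over input[1:] that appends input[0] as each permutation completes
-- (objective: alternative). Equivalence of the RETURN value is proved on nonempty input.

-- ===== PORT A =====
-- itertools.permutations(input[1:]) = PySem.List.permutations rest rest.length;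
-- input[0] (IndexError on empty input) is PySem.List.pyGet?, kept inside the loop as in A.
def makeArrangements (input : List String) : List (List String) :=
  let rest := PySem.List.slice input (some 1) none
  let permutations := PySem.List.permutations rest rest.length
  permutations.foldl
    (fun result permutation => result ++ [permutation ++ (PySem.List.pyGet? input 0).toList]) []

-- ===== PORT B =====
-- go(remaining, prefix): pick each index i in order, recurse on remaining[:i] + remaining[i+1:].
-- `.attach` only carries the `i ∈ range` fact needed for termination.
def pvGo (first : String) (remaining pre : List String) : List (List String) :=
  if remaining = [] then [pre ++ [first]]
  else
    (List.range remaining.length).attach.flatMap (fun i =>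
      pvGo first
        (PySem.List.slice remaining none (some (i.1 : Int)) ++
          PySem.List.slice remaining (some ((i.1 : Int) + 1)) none)
        (pre ++ (PySem.List.pyGet? remaining (i.1 : Int)).toList))
termination_by remaining.length
decreasing_by
  have hi : i.1 < remaining.length := List.mem_range.mp i.2
  have h2 : ((i.1 : Int) + 1) = ((i.1 + 1 : Nat) : Int) := by push_cast; ring
  rw [PySem.List.slice_to_natCast, h2, PySem.List.slice_from_natCast]
  simp only [List.length_append, List.length_take, List.length_drop]
  omega

def makeArrangements_alt (input : List String) : List (List String) :=
  match PySem.List.pyGet? input 0 with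
  | none => []  -- unreachable under Pre_: first = input[0] raises in Python
  | some first => pvGo first (PySem.List.slice input (some 1) none) []

-- ===== PRECONDITION & SPEC =====
-- A raises IndexError on the empty list (input[0] inside the loop); excluded.
def Pre_makeArrangements (input : List String) : Prop := input ≠ []
instance (input : List String) : Decidable (Pre_makeArrangements input) := by unfold Pre_makeArrangements; infer_instance
def pvWitness_makeArrangements : List String := (["a", "b", "c"])

def Spec_makeArrangements (input : List String) (out : List (List String)) : Prop := out = makeArrangements_alt input
instance (input : List String) (out : List (List String)) : Decidable (Spec_makeArrangements input out) := by unfold Spec_makeArrangements; infer_instance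

-- ===== CLAIM (what is proved, stated in full; the proofs are below) =====
def Claim_equal_makeArrangements : Prop := ∀ (input : List String), Dom_makeArrangements input → Pre_makeArrangements input → Spec_makeArrangements input (makeArrangements input)

-- ===== LEMMAS AND PROOFS =====

-- B's recursive generator computes exactly itertools' permutation list, each entry
-- wrapped between the accumulated prefix and the trailing first element.
theorem pvGo_eq_permutations (n : Nat) (first : String) (remaining pre : List String)
    (hn : remaining.length = n) :
    pvGo first remaining pre
      = (PySem.List.permutations remaining n).map (fun p => pre ++ p ++ [first]) := by
  induction n generalizing remaining pre with
  | zero =>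
    rw [List.length_eq_zero_iff] at hn
    subst hn
    rw [pvGo]
    simp [PySem.List.permutations]
  | succ n ih =>
    match remaining, hn with
    | x :: xs, hn =>
      rw [pvGo, if_neg (List.cons_ne_nil x xs)]
      rw [PySem.List.permutations_succ]
      rw [List.map_flatMap]
      have hattach := List.flatMap_subtype
        (l := (List.range (x :: xs).length).attach)
        (f := fun i => pvGo first
          (PySem.List.slice (x :: xs) none (some (i.1 : Int)) ++
            PySem.List.slice (x :: xs) (some ((i.1 : Int) + 1)) none)
          (pre ++ (PySem.List.pyGet? (x :: xs) (i.1 : Int)).toList))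
        (g := fun a => pvGo first
          (PySem.List.slice (x :: xs) none (some (a : Int)) ++
            PySem.List.slice (x :: xs) (some ((a : Int) + 1)) none)
          (pre ++ (PySem.List.pyGet? (x :: xs) (a : Int)).toList))
        (fun a h => rfl)
      rw [List.unattach_attach] at hattach
      rw [hattach]
      apply List.flatMap_congr
      intro i hi
      have hilt : i < (x :: xs).length := List.mem_range.mp hi
      have hget : PySem.List.pyGet? (x :: xs) (i : Int) = (x :: xs)[i]? :=
        PySem.List.pyGet?_natCast _ _
      have hsome : (x :: xs)[i]? = some ((x :: xs)[i]) := List.getElem?_eq_getElem hilt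
      have hslice : PySem.List.slice (x :: xs) none (some (i : Int)) ++
          PySem.List.slice (x :: xs) (some ((i : Int) + 1)) none = (x :: xs).eraseIdx i := by
        have h2 : ((i : Int) + 1) = ((i + 1 : Nat) : Int) := by push_cast; ring
        rw [PySem.List.slice_to_natCast, h2, PySem.List.slice_from_natCast]
        exact (List.eraseIdx_eq_take_drop_succ _ _).symm
      rw [hget, hsome, hslice]
      have hlen : ((x :: xs).eraseIdx i).length = n := by
        rw [List.length_eraseIdx_of_lt hilt]
        simpa using hn
      rw [ih _ _ hlen]
      simp [List.map_map, Function.comp, List.append_assoc]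

-- A's accumulator loop is map over the permutation list.
theorem foldl_append_map (f : List String → List String) (l : List (List String))
    (acc : List (List String)) :
    l.foldl (fun result p => result ++ [f p]) acc = acc ++ l.map f :=
  PySem.List.foldl_append_singleton_eq_map f l acc

-- ===== VERDICT (by name: the statement is the Claim_ definition above) =====
theorem makeArrangements_spec : Claim_equal_makeArrangements := by
  intro input _ hpre
  match input, hpre with
  | x :: xs, _ =>
    unfold Spec_makeArrangements makeArrangements makeArrangements_alt
    rw [PySem.List.pyGet?_zero_cons]
    have hslice : PySem.List.slice (x :: xs) (some 1) none = xs := by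
      have : ((1 : Nat) : Int) = (1 : Int) := by norm_num
      rw [← this, PySem.List.slice_from_natCast]
      simp
    simp only [hslice, Option.toList_some]
    rw [foldl_append_map (fun p => p ++ [x])]
    rw [pvGo_eq_permutations xs.length x xs [] rfl]
    simp
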